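-- pv_equiv track=rewrite | github.com/elizabalint/Python2023-2024 | Laborator2/Lab2_Python.py | function
-- ===== SOURCE A (Python) =====
-- def function(mat):
--     final = []
--     for i in range(len(mat)):
--         for j in range(len(mat[i])):
--             curent = mat[i][j]
--             ok = True
--             for k in range(i):
--                 if mat[k][j] >= curent:
--                     ok = False
--                     break
--             if ok == False:
--                 final.append((i, j))
--     return final
-- ===== SOURCE B (Python) =====
-- def function(mat):
--     # Running column maxima updated row by row: one pass over the cells, O(1) per cell.
--     final = []
--     cm = None  # column-wise maxima of all rows seen so far
--     for i, row in enumerate(mat):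
--         if cm is None:
--             cm = list(row)
--         else:
--             for j, v in enumerate(row):
--                 if cm[j] >= v:
--                     final.append((i, j))
--             cm = [max(m, v) for m, v in zip(cm, row)]
--     return final
-- ===== Notes on version B (the rewrite author's own statement) =====
-- stated objective: faster
-- what changed: A rescans the whole column prefix for every cell (three nested loops, O(R^2*C)); B keeps a running per-column maximum list updated row by row, so each cell is checked against one running value in a single pass (measured 2.21x at the largest size).
-- outside the precondition, e.g. on function([[-2, -2], [], [-2, -3]]): A returns [(2, 0), (2, 1)], B raises IndexError
import Mathlib
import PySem

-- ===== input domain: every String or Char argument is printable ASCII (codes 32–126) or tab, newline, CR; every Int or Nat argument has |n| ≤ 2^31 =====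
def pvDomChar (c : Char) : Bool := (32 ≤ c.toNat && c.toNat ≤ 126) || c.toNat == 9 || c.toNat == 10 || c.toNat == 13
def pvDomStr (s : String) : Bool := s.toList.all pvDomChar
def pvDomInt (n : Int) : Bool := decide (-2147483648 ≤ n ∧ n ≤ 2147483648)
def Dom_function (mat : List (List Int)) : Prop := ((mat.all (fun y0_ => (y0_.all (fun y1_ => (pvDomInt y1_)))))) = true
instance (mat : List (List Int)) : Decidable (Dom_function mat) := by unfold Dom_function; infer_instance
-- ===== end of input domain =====

-- B replaces A's per-cell rescan of the whole column prefix with a running per-column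
-- maximum list updated row by row (objective: alternative single-pass algorithm).

-- ===== PORT A =====
-- literal transliteration of A's three nested loops; pyGetD is exact under Pre_ (indices in range,
-- so Python's mat[k][j] never raises there)
def function (mat : List (List Int)) : List (Int × Int) :=
  (PySem.List.pyRange 0 (PySem.List.len mat)).foldl (fun final i =>
    (PySem.List.pyRange 0 (PySem.List.len (PySem.List.pyGetD mat i []))).foldl (fun final j =>
      let curent := PySem.List.pyGetD (PySem.List.pyGetD mat i []) j 0
      let ok := (PySem.List.pyRange 0 i).foldl (fun ok k =>
        if PySem.List.pyGetD (PySem.List.pyGetD mat k []) j 0 ≥ curent then false else ok) true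
      if ok = false then final ++ [(i, j)] else final) final) []

-- ===== PORT B =====
-- B's inner loop body: 'if cm[j] >= v: final.append((i, j))'
def altInner (i : Int) (cm : List Int) (f : List (Int × Int)) (jv : Int × Int) : List (Int × Int) :=
  if PySem.List.pyGetD cm jv.1 0 ≥ jv.2 then f ++ [(i, jv.1)] else f

-- B's per-row step: the first row initialises cm; each later row flags its cells against cm
-- and then zip-maxes cm with the row
def altStep (acc : List (Int × Int) × Option (List Int)) (ir : Int × List Int) :
    List (Int × Int) × Option (List Int) :=
  match acc.2 with
  | none => (acc.1, some ir.2)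
  | some cm =>
      ((PySem.List.enumerate ir.2).foldl (altInner ir.1 cm) acc.1,
       some ((cm.zip ir.2).map (fun p => max p.1 p.2)))

def function_alt (mat : List (List Int)) : List (Int × Int) :=
  ((PySem.List.enumerate mat).foldl altStep ([], none)).1

-- ===== PRECONDITION & SPEC =====
-- Pre_ excludes ragged matrices in which some later row is longer than an earlier one: there
-- A indexes mat[k][j] past the end of row k and raises IndexError, except when an earlier
-- break accidentally skips the short row — and on exactly those inputs B itself raises
-- IndexError (cm[j] out of range), so they are excluded rather than matched.
def Pre_function (mat : List (List Int)) : Prop :=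
  List.Pairwise (fun r s : List Int => s.length ≤ r.length) mat
instance (mat : List (List Int)) : Decidable (Pre_function mat) := by
  unfold Pre_function; infer_instance
def pvWitness_function : List (List Int) := [[3, 1], [2]]

def Spec_function (mat : List (List Int)) (out : List (Int × Int)) : Prop := out = function_alt mat
instance (mat : List (List Int)) (out : List (Int × Int)) : Decidable (Spec_function mat out) := by
  unfold Spec_function; infer_instance

-- ===== CLAIM (what is proved, stated in full; the proofs are below) =====
def Claim_equal_function : Prop :=
  ∀ (mat : List (List Int)), Dom_function mat → Pre_function mat → Spec_function mat (function mat)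

-- ===== LEMMAS AND PROOFS =====

-- reference form both ports are reduced to: cell (i,j) is flagged iff some earlier row has a
-- ≥ value in column j
def hitB (mat : List (List Int)) (i j : Nat) : Bool :=
  (List.range i).any (fun k => decide ((mat.getD k []).getD j 0 ≥ (mat.getD i []).getD j 0))
def rowSpec (mat : List (List Int)) (i : Nat) : List (Int × Int) :=
  ((List.range (mat.getD i []).length).filter (hitB mat i)).map (fun j : Nat => ((i : Int), (j : Int)))
def specF (mat : List (List Int)) : List (Int × Int) :=
  (List.range mat.length).flatMap (rowSpec mat)
def cmFold : List (List Int) → List Int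
  | [] => []
  | r :: rs => rs.foldl (fun cm r' => (cm.zip r').map (fun p => max p.1 p.2)) r

-- Pre extraction
theorem pre_len {mat : List (List Int)} (h : Pre_function mat) {k i : Nat}
    (hk : k < i) (hi : i < mat.length) :
    (mat.getD i []).length ≤ (mat.getD k []).length := by
  have hk' : k < mat.length := lt_trans hk hi
  rw [List.getD_eq_getElem _ _ hi, List.getD_eq_getElem _ _ hk']
  exact (List.pairwise_iff_getElem.mp h) k i hk' hi hk

theorem cmFold_snoc (r : List Int) (rs : List (List Int)) (r' : List Int) :
    cmFold ((r :: rs) ++ [r']) = ((cmFold (r :: rs)).zip r').map (fun p => max p.1 p.2) := by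
  simp [cmFold, List.foldl_append]

theorem take_succ_eq {mat : List (List Int)} {i : Nat} (hi : i < mat.length) :
    mat.take (i + 1) = mat.take i ++ [mat.getD i []] := by
  rw [List.take_add_one, List.getD_eq_getElem _ _ hi]
  simp [List.getElem?_eq_getElem hi]

theorem zmax_getD {cm r : List Int} {j : Nat} (h1 : j < cm.length) (h2 : j < r.length) :
    (((cm.zip r).map (fun p => max p.1 p.2)).getD j 0) = max (cm.getD j 0) (r.getD j 0) := by
  have hz : j < (cm.zip r).length := by simp [List.length_zip]; omega
  rw [List.getD_eq_getElem _ _ (by simpa using hz), List.getD_eq_getElem _ _ h1,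
    List.getD_eq_getElem _ _ h2]
  simp [List.getElem_zip]

theorem cmFold_take_ne_nil {mat : List (List Int)} {i : Nat} (h1 : 1 ≤ i) (h2 : i ≤ mat.length) :
    ∃ r rs, mat.take i = r :: rs := by
  have : (mat.take i).length = i := by simp [List.length_take]; omega
  cases htake : mat.take i with
  | nil => rw [htake] at this; simp at this; omega
  | cons r rs => exact ⟨r, rs, rfl⟩

theorem cmFold_len {mat : List (List Int)} (h : Pre_function mat) :
    ∀ i : Nat, 1 ≤ i → i ≤ mat.length →
      (cmFold (mat.take i)).length = (mat.getD (i - 1) []).length := by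
  intro i
  induction i with
  | zero => omega
  | succ n ih =>
    intro _ hle
    by_cases hn : 1 ≤ n
    · have hnlt : n < mat.length := by omega
      obtain ⟨r, rs, htake⟩ := cmFold_take_ne_nil hn (le_of_lt hnlt) (mat := mat)
      rw [take_succ_eq hnlt, htake, cmFold_snoc, ← htake]
      have hlen := ih hn (le_of_lt hnlt)
      have hmono := pre_len h (show n - 1 < n by omega) hnlt
      simp only [List.length_map, List.length_zip, hlen, Nat.add_sub_cancel]
      omega
    · have hn0 : n = 0 := by omega
      subst hn0
      have h0 : 0 < mat.length := by omega
      cases mat with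
      | nil => simp at h0
      | cons r rest => simp [cmFold]

theorem cmFold_ge_iff {mat : List (List Int)} (h : Pre_function mat) :
    ∀ i : Nat, 1 ≤ i → i ≤ mat.length → ∀ j : Nat, (∀ k < i, j < (mat.getD k []).length) →
      ∀ v : Int, ((cmFold (mat.take i)).getD j 0 ≥ v ↔ ∃ k < i, (mat.getD k []).getD j 0 ≥ v) := by
  intro i
  induction i with
  | zero => omega
  | succ n ih =>
    intro _ hle j hj v
    by_cases hn : 1 ≤ n
    · have hnlt : n < mat.length := by omega
      obtain ⟨r, rs, htake⟩ := cmFold_take_ne_nil hn (le_of_lt hnlt) (mat := mat)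
      rw [take_succ_eq hnlt, htake, cmFold_snoc, ← htake]
      have hjc : j < (cmFold (mat.take n)).length := by
        rw [cmFold_len h n hn (le_of_lt hnlt)]
        exact hj (n - 1) (by omega)
      have hjr : j < (mat.getD n []).length := hj n (by omega)
      rw [zmax_getD hjc hjr]
      rw [ge_iff_le, le_max_iff]
      constructor
      · rintro (hc | hr)
        · obtain ⟨k, hk, hkv⟩ := (ih hn (le_of_lt hnlt) j (fun k hk => hj k (by omega)) v).mp hc
          exact ⟨k, by omega, hkv⟩
        · exact ⟨n, by omega, hr⟩
      · rintro ⟨k, hk, hkv⟩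
        by_cases hkn : k < n
        · exact Or.inl ((ih hn (le_of_lt hnlt) j (fun k hk => hj k (by omega)) v).mpr ⟨k, hkn, hkv⟩)
        · have : k = n := by omega
          subst this; exact Or.inr hkv
    · have hn0 : n = 0 := by omega
      subst hn0
      have h0 : 0 < mat.length := by omega
      cases mat with
      | nil => simp at h0
      | cons r rest =>
        simp only [List.take_succ_cons, List.take_zero, cmFold, List.foldl_nil]
        constructor
        · intro hv; exact ⟨0, by omega, by simpa using hv⟩
        · rintro ⟨k, hk, hkv⟩
          have : k = 0 := by omega
          subst this; simpa using hkv

theorem inner_eq {mat : List (List Int)} (h : Pre_function mat) {i : Nat}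
    (h1 : 1 ≤ i) (hi : i < mat.length) (acc : List (Int × Int)) :
    (PySem.List.enumerate (mat.getD i [])).foldl (altInner (i : Int) (cmFold (mat.take i))) acc
      = acc ++ rowSpec mat i := by
  rw [PySem.List.enumerate_eq_map_pyRange (mat.getD i []) 0]
  simp only [PySem.List.len_eq, PySem.List.pyRange_zero_nat, List.foldl_map,
    altInner, PySem.List.pyGetD_natCast]
  rw [PySem.List.foldl_append_ite
    (fun j : Nat => (cmFold (mat.take i)).getD j 0 ≥ (mat.getD i []).getD j 0)
    (fun j : Nat => ((i : Int), (j : Int)))]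
  unfold rowSpec
  congr 1
  congr 1
  apply List.filter_congr
  intro j hj
  have hjlen : j < (mat.getD i []).length := List.mem_range.mp hj
  have hall : ∀ k < i, j < (mat.getD k []).length := by
    intro k hk
    exact lt_of_lt_of_le hjlen (pre_len h hk hi)
  rw [Bool.eq_iff_iff]
  simp only [decide_eq_true_eq, hitB, List.any_eq_true, List.mem_range]
  rw [cmFold_ge_iff h i h1 (le_of_lt hi) j hall]

theorem altFold_spec {mat : List (List Int)} (h : Pre_function mat) :
    ∀ (rows : List (List Int)) (i : Nat) (acc : List (Int × Int)),
      1 ≤ i → mat.drop i = rows →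
      ((PySem.List.enumerate rows (i : Int)).foldl altStep (acc, some (cmFold (mat.take i)))).1
        = acc ++ (List.range' i rows.length).flatMap (rowSpec mat) := by
  intro rows
  induction rows with
  | nil => intro i acc _ _; simp [PySem.List.enumerate_nil]
  | cons r rs ih =>
    intro i acc h1 hrows
    have hi : i < mat.length := by
      by_contra hc
      rw [List.drop_eq_nil_of_le (by omega)] at hrows
      simp at hrows
    have hr : mat.getD i [] = r := by
      have h0 : (mat.drop i)[0]? = some r := by rw [hrows]; rfl
      rw [List.getElem?_drop, Nat.add_zero] at h0
      rw [List.getD_eq_getElem?_getD, h0]; rfl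
    have hrs : mat.drop (i + 1) = rs := by
      have := congrArg List.tail hrows
      rw [List.tail_drop] at this
      simpa using this
    rw [PySem.List.enumerate_cons, List.foldl_cons]
    have hstep : altStep (acc, some (cmFold (mat.take i))) ((i : Int), r)
        = ((PySem.List.enumerate r).foldl (altInner (i : Int) (cmFold (mat.take i))) acc,
           some (((cmFold (mat.take i)).zip r).map (fun p => max p.1 p.2))) := by
      simp [altStep]
    rw [hstep]
    have hcm1 : ((cmFold (mat.take i)).zip r).map (fun p => max p.1 p.2)
        = cmFold (mat.take (i + 1)) := by
      obtain ⟨r', rs', htake⟩ := cmFold_take_ne_nil h1 (le_of_lt hi) (mat := mat)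
      rw [take_succ_eq hi, htake, cmFold_snoc, ← htake, hr]
    rw [hcm1]
    have hinner : (PySem.List.enumerate r).foldl (altInner (i : Int) (cmFold (mat.take i))) acc
        = acc ++ rowSpec mat i := by
      rw [← hr]; exact inner_eq h h1 hi acc
    rw [hinner]
    have hcast : ((i : Int) + 1) = ((i + 1 : Nat) : Int) := by push_cast; ring
    rw [hcast, ih (i + 1) (acc ++ rowSpec mat i) (by omega) hrs]
    rw [List.length_cons, List.range'_succ, List.flatMap_cons, List.append_assoc]

theorem B_eq_spec (mat : List (List Int)) (h : Pre_function mat) : function_alt mat = specF mat := by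
  cases mat with
  | nil => simp [function_alt, specF, PySem.List.enumerate_nil]
  | cons r rest =>
    unfold function_alt
    rw [PySem.List.enumerate_cons, List.foldl_cons]
    have hstep : altStep ([], none) ((0 : Int), r) = ([], some r) := by simp [altStep]
    rw [hstep]
    have hcm : cmFold ((r :: rest).take 1) = r := by simp [cmFold]
    have h01 : ((0 : Int) + 1) = ((1 : Nat) : Int) := by norm_num
    rw [h01]
    conv_lhs => rw [← hcm]
    rw [altFold_spec h rest 1 [] (by omega) (by simp)]
    have hspec : specF (r :: rest) = rowSpec (r :: rest) 0 ++ (List.range' 1 rest.length).flatMap (rowSpec (r :: rest)) := by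
      rw [specF, List.length_cons, List.range_eq_range', List.range'_succ, List.flatMap_cons]
    rw [hspec]
    have hrow0 : rowSpec (r :: rest) 0 = [] := by simp [rowSpec, hitB]
    rw [hrow0]

theorem A_eq_spec (mat : List (List Int)) : function mat = specF mat := by
  simp only [function, PySem.List.len_eq, PySem.List.pyRange_zero_nat, List.foldl_map,
    PySem.List.pyGetD_natCast, PySem.List.foldl_ite_false_eq, List.any_map, Bool.true_and,
    Bool.not_eq_false']
  simp only [Function.comp_def, PySem.List.pyGetD_natCast, PySem.List.foldl_append_if,
    PySem.List.foldl_append_eq_flatMap, List.nil_append]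
  unfold specF rowSpec hitB
  rfl


-- ===== VERDICT (by name: the statement is the Claim_ definition above) =====
theorem function_spec : Claim_equal_function := by
  intro mat _ hpre
  unfold Spec_function
  rw [A_eq_spec, B_eq_spec mat hpre]
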